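-- pv_equiv track=rewrite | github.com/mimibetty/CP-Training- | Khanh/OLPMTTN2025/test/gentest.py | calculate_total_power
-- ===== SOURCE A (Python) =====
-- MOD = 998244353
--
-- def s(k):
--     if k > 0: return 1
--     if k < 0: return -1
--     return 0
--
-- def calculate_total_power(heroes):
--     total = 0
--     n = len(heroes)
--     for i in range(n):
--         for j in range(i+1, n):
--             for k in range(j+1, n):
--                 a, x = heroes[i]
--                 b, y = heroes[j]
--                 c, z = heroes[k]
--                 # Check valid condition
--                 if not (a >= b + c or b >= a + c or c >= a + b):
--                     D = 1 + abs(s(x - y)) + abs(s(x*y - x*z + z*z - y*z))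
--                     power = (a + b + c) * D
--                     total = (total + power) % MOD
--     return total
-- ===== SOURCE B (Python) =====
-- MOD = 998244353
--
-- def calculate_total_power(heroes):
--     # structural pass over suffixes; triangle test via the largest side,
--     # D computed directly as the number of distinct x-values; one final mod
--     total = 0
--     suffix = list(heroes)
--     while suffix:
--         (a, x), suffix = suffix[0], suffix[1:]
--         inner = suffix
--         while inner:
--             (b, y), inner = inner[0], inner[1:]
--             for (c, z) in inner:
--                 if 2 * max(a, b, c) < a + b + c:
--                     total += (a + b + c) * len({x, y, z})
--     return total % MOD
-- ===== Notes on version B (the rewrite author's own statement) =====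
-- stated objective: simpler
-- what changed: B replaces the three index loops over range(n) with one structural pass over list suffixes, tests the triangle condition with a single largest-side comparison instead of three disjuncts, computes the factor D directly as the number of distinct x-values via len({x,y,z}) instead of sign-function arithmetic, and applies the modulus once at the end instead of at every addition.
import Mathlib
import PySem

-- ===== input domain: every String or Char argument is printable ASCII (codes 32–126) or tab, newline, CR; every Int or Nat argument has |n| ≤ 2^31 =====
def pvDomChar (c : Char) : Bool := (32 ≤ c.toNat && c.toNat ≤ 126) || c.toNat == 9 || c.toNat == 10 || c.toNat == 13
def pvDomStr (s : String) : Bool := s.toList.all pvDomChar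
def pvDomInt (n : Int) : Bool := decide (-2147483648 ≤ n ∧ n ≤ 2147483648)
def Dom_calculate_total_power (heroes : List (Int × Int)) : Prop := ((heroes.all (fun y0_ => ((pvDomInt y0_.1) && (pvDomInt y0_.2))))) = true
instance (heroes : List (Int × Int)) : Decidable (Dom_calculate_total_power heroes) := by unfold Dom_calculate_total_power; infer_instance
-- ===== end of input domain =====

-- B iterates structurally over list suffixes, tests the triangle with one largest-side
-- comparison, computes D as the number of distinct x-values, and takes the modulus once
-- at the end (objective: simpler); same return value as A on every input.

-- ===== PORT A =====
-- helper s(k) of A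
def pys (k : Int) : Int := if k > 0 then 1 else if k < 0 then -1 else 0

def calculate_total_power (heroes : List (Int × Int)) : Int :=
  let n : Int := (heroes.length : Int)
  (PySem.List.pyRange 0 n).foldl (fun total i =>
    (PySem.List.pyRange (i + 1) n).foldl (fun total j =>
      (PySem.List.pyRange (j + 1) n).foldl (fun total k =>
        let p := PySem.List.pyGetD heroes i (0, 0)
        let q := PySem.List.pyGetD heroes j (0, 0)
        let r := PySem.List.pyGetD heroes k (0, 0)
        if ¬(p.1 ≥ q.1 + r.1 ∨ q.1 ≥ p.1 + r.1 ∨ r.1 ≥ p.1 + q.1) then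
          PySem.Int.mod (total + (p.1 + q.1 + r.1) *
            (1 + |pys (p.2 - q.2)| +
              |pys (p.2 * q.2 - p.2 * r.2 + r.2 * r.2 - q.2 * r.2)|)) 998244353
        else total) total) total) 0

-- ===== PORT B =====
-- Source B: 'for (c, z) in inner: if 2*max(a,b,c) < a+b+c: total += (a+b+c)*len({x,y,z})'
def altInner (a x b y : Int) (inner : List (Int × Int)) (total : Int) : Int :=
  inner.foldl (fun total r =>
    if 2 * max a (max b r.1) < a + b + r.1 then
      total + (a + b + r.1) * PySem.Set.len (PySem.Set.ofList [x, y, r.2])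
    else total) total

-- Source B: 'while inner: (b, y), inner = inner[0], inner[1:]; <altInner>'
def altLoop2 (a x : Int) : List (Int × Int) → Int → Int
  | [], total => total
  | q :: inner, total => altLoop2 a x inner (altInner a x q.1 q.2 inner total)

-- Source B: 'while suffix: (a, x), suffix = suffix[0], suffix[1:]; <altLoop2>'
def altLoop1 : List (Int × Int) → Int → Int
  | [], total => total
  | p :: suffix, total => altLoop1 suffix (altLoop2 p.1 p.2 suffix total)

def calculate_total_power_alt (heroes : List (Int × Int)) : Int :=
  PySem.Int.mod (altLoop1 heroes 0) 998244353

-- ===== PRECONDITION & SPEC =====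
def Spec_calculate_total_power (heroes : List (Int × Int)) (out : Int) : Prop := out = calculate_total_power_alt heroes
instance (heroes : List (Int × Int)) (out : Int) : Decidable (Spec_calculate_total_power heroes out) := by unfold Spec_calculate_total_power; infer_instance

-- ===== CLAIM (what is proved, stated in full; the proofs are below) =====
def Claim_equal_calculate_total_power : Prop := ∀ (heroes : List (Int × Int)), Dom_calculate_total_power heroes → Spec_calculate_total_power heroes (calculate_total_power heroes)

-- ===== LEMMAS AND PROOFS =====

-- the per-triple contribution, in B's formulation
def termB (p q r : Int × Int) : Int :=
  if 2 * max p.1 (max q.1 r.1) < p.1 + q.1 + r.1 then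
    (p.1 + q.1 + r.1) * PySem.Set.len (PySem.Set.ofList [p.2, q.2, r.2])
  else 0

-- the pure (un-modded) pair/triple sums B accumulates
def pairT (p : Int × Int) : List (Int × Int) → Int
  | [] => 0
  | q :: t => (t.map (termB p q)).sum + pairT p t

def tripT : List (Int × Int) → Int
  | [] => 0
  | p :: t => pairT p t + tripT t

lemma abs_pys (t : Int) : |pys t| = if t = 0 then 0 else 1 := by
  unfold pys; split_ifs <;> simp_all; omega

lemma setlen3 (x y z : Int) :
    PySem.Set.len (PySem.Set.ofList [x, y, z]) =
      1 + (if x = y then 0 else 1) + (if x = z ∨ y = z then 0 else 1) := by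
  simp only [PySem.Set.ofList, PySem.Set.add, PySem.Set.len, List.foldl, PySem.Set.contains]
  by_cases hxy : x = y <;> by_cases hxz : x = z <;> by_cases hyz : y = z <;> simp_all [eq_comm]

-- A's per-triple contribution equals B's, pointwise
lemma termAB (p q r : Int × Int) :
    (if ¬(p.1 ≥ q.1 + r.1 ∨ q.1 ≥ p.1 + r.1 ∨ r.1 ≥ p.1 + q.1) then
      (p.1 + q.1 + r.1) *
        (1 + |pys (p.2 - q.2)| + |pys (p.2 * q.2 - p.2 * r.2 + r.2 * r.2 - q.2 * r.2)|)
    else 0) = termB p q r := by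
  have h2 : p.2 * q.2 - p.2 * r.2 + r.2 * r.2 - q.2 * r.2 = (p.2 - r.2) * (q.2 - r.2) := by ring
  have hc : (¬(p.1 ≥ q.1 + r.1 ∨ q.1 ≥ p.1 + r.1 ∨ r.1 ≥ p.1 + q.1)) ↔
      2 * max p.1 (max q.1 r.1) < p.1 + q.1 + r.1 := by omega
  have hD : 1 + |pys (p.2 - q.2)| + |pys (p.2 * q.2 - p.2 * r.2 + r.2 * r.2 - q.2 * r.2)| =
      PySem.Set.len (PySem.Set.ofList [p.2, q.2, r.2]) := by
    rw [h2, abs_pys, abs_pys, setlen3]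
    have h3 : ((p.2 - r.2) * (q.2 - r.2) = 0) ↔ (p.2 = r.2 ∨ q.2 = r.2) := by
      rw [mul_eq_zero, sub_eq_zero, sub_eq_zero]
    by_cases hxy : p.2 = q.2 <;> by_cases h5 : p.2 = r.2 ∨ q.2 = r.2 <;>
      simp [hxy, h5, h3, sub_eq_zero]
  rw [hD, termB, if_congr hc rfl rfl]

-- -------- B side: the accumulators compute the pure sums --------
lemma altInner_eq (a x b y : Int) (l : List (Int × Int)) (total : Int) :
    altInner a x b y l total = total + (l.map (termB (a, x) (b, y))).sum := by
  induction l generalizing total with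
  | nil => simp [altInner]
  | cons r t ih =>
    simp only [altInner, List.foldl, List.map, List.sum_cons] at *
    by_cases hc : 2 * max a (max b r.1) < a + b + r.1 <;>
      simp only [hc, if_pos, if_neg, not_false_iff, termB, ih] <;> ring

lemma altLoop2_eq (a x : Int) (l : List (Int × Int)) (total : Int) :
    altLoop2 a x l total = total + pairT (a, x) l := by
  induction l generalizing total with
  | nil => simp [altLoop2, pairT]
  | cons q t ih => rw [altLoop2, ih, altInner_eq, pairT]; ring

lemma altLoop1_eq (l : List (Int × Int)) (total : Int) :
    altLoop1 l total = total + tripT l := by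
  induction l generalizing total with
  | nil => simp [altLoop1, tripT]
  | cons p t ih => rw [altLoop1, ih, altLoop2_eq, tripT]; ring

-- -------- A side: the three mod-folds over index ranges compute the same sums mod M --------

-- A's innermost loop body (proof-side name for the transliterated lambda)
def bodyA (xs : List (Int × Int)) (p q : Int × Int) (total k : Int) : Int :=
  let r := PySem.List.pyGetD xs k (0, 0)
  if ¬(p.1 ≥ q.1 + r.1 ∨ q.1 ≥ p.1 + r.1 ∨ r.1 ≥ p.1 + q.1) then
    PySem.Int.mod (total + (p.1 + q.1 + r.1) *
      (1 + |pys (p.2 - q.2)| +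
        |pys (p.2 * q.2 - p.2 * r.2 + r.2 * r.2 - q.2 * r.2)|)) 998244353
  else total

lemma bodyA_eq (xs : List (Int × Int)) (p q : Int × Int) (S a : Int)
    (ha : 0 ≤ a) (hlt : a < (xs.length : Int)) :
    bodyA xs p q (S % 998244353) a
      = (S + termB p q (xs[a.toNat]'(by omega))) % 998244353 := by
  have hget : PySem.List.pyGetD xs a (0, 0) = xs[a.toNat]'(by omega) :=
    PySem.List.pyGetD_eq_getElem xs (0, 0) ha (by exact_mod_cast hlt)
  unfold bodyA
  rw [← termAB p q (xs[a.toNat]'(by omega))]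
  simp only [hget]
  set r := xs[a.toNat]'(by omega)
  by_cases hC : ¬(p.1 ≥ q.1 + r.1 ∨ q.1 ≥ p.1 + r.1 ∨ r.1 ≥ p.1 + q.1)
  · rw [if_pos hC, if_pos hC, PySem.Int.mod_eq_emod_of_pos (by norm_num),
      Int.emod_add_emod]
  · rw [if_neg hC, if_neg hC, add_zero]

lemma foldA_inner (xs : List (Int × Int)) (p q : Int × Int) :
    ∀ (m : Nat) (a S : Int), 0 ≤ a → xs.length - a.toNat ≤ m →
      (PySem.List.pyRange a (xs.length : Int)).foldl (bodyA xs p q) (S % 998244353)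
      = (S + ((xs.drop a.toNat).map (termB p q)).sum) % 998244353 := by
  intro m
  induction m with
  | zero =>
    intro a S ha hm
    rw [PySem.List.pyRange_one_eq_nil (by omega), List.foldl_nil,
      List.drop_of_length_le (by omega)]
    simp
  | succ m ih =>
    intro a S ha hm
    by_cases hlt : a < (xs.length : Int)
    · have hidx : a.toNat < xs.length := by omega
      rw [PySem.List.pyRange_one_cons hlt, List.foldl_cons,
        bodyA_eq xs p q S a ha hlt,
        ih (a + 1) (S + termB p q xs[a.toNat]) (by omega) (by omega),
        show (a + 1).toNat = a.toNat + 1 by omega,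
        List.drop_eq_getElem_cons hidx, List.map_cons, List.sum_cons, add_assoc]
    · rw [PySem.List.pyRange_one_eq_nil (by omega), List.foldl_nil,
        List.drop_of_length_le (by omega)]
      simp

lemma foldA_mid (xs : List (Int × Int)) (p : Int × Int) :
    ∀ (m : Nat) (a S : Int), 0 ≤ a → xs.length - a.toNat ≤ m →
      (PySem.List.pyRange a (xs.length : Int)).foldl (fun total j =>
        (PySem.List.pyRange (j + 1) (xs.length : Int)).foldl
          (bodyA xs p (PySem.List.pyGetD xs j (0, 0))) total) (S % 998244353)
      = (S + pairT p (xs.drop a.toNat)) % 998244353 := by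
  intro m
  induction m with
  | zero =>
    intro a S ha hm
    rw [PySem.List.pyRange_one_eq_nil (by omega), List.foldl_nil,
      List.drop_of_length_le (by omega)]
    simp [pairT]
  | succ m ih =>
    intro a S ha hm
    by_cases hlt : a < (xs.length : Int)
    · have hidx : a.toNat < xs.length := by omega
      have hget : PySem.List.pyGetD xs a (0, 0) = xs[a.toNat] :=
        PySem.List.pyGetD_eq_getElem xs (0, 0) ha (by exact_mod_cast hlt)
      rw [PySem.List.pyRange_one_cons hlt]
      simp only [List.foldl_cons]
      rw [foldA_inner xs p (PySem.List.pyGetD xs a (0, 0)) xs.length (a + 1) S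
          (by omega) (by omega),
        ih (a + 1) _ (by omega) (by omega),
        show (a + 1).toNat = a.toNat + 1 by omega,
        List.drop_eq_getElem_cons hidx, hget, pairT, add_assoc]
    · rw [PySem.List.pyRange_one_eq_nil (by omega), List.foldl_nil,
        List.drop_of_length_le (by omega)]
      simp [pairT]

lemma foldA_outer (xs : List (Int × Int)) :
    ∀ (m : Nat) (a S : Int), 0 ≤ a → xs.length - a.toNat ≤ m →
      (PySem.List.pyRange a (xs.length : Int)).foldl (fun total i =>
        (PySem.List.pyRange (i + 1) (xs.length : Int)).foldl (fun total j =>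
          (PySem.List.pyRange (j + 1) (xs.length : Int)).foldl
            (bodyA xs (PySem.List.pyGetD xs i (0, 0)) (PySem.List.pyGetD xs j (0, 0)))
            total) total) (S % 998244353)
      = (S + tripT (xs.drop a.toNat)) % 998244353 := by
  intro m
  induction m with
  | zero =>
    intro a S ha hm
    rw [PySem.List.pyRange_one_eq_nil (by omega), List.foldl_nil,
      List.drop_of_length_le (by omega)]
    simp [tripT]
  | succ m ih =>
    intro a S ha hm
    by_cases hlt : a < (xs.length : Int)
    · have hidx : a.toNat < xs.length := by omega
      have hget : PySem.List.pyGetD xs a (0, 0) = xs[a.toNat] :=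
        PySem.List.pyGetD_eq_getElem xs (0, 0) ha (by exact_mod_cast hlt)
      rw [PySem.List.pyRange_one_cons hlt]
      simp only [List.foldl_cons]
      rw [foldA_mid xs (PySem.List.pyGetD xs a (0, 0)) xs.length (a + 1) S
          (by omega) (by omega),
        ih (a + 1) _ (by omega) (by omega),
        show (a + 1).toNat = a.toNat + 1 by omega,
        List.drop_eq_getElem_cons hidx, hget, tripT, add_assoc]
    · rw [PySem.List.pyRange_one_eq_nil (by omega), List.foldl_nil,
        List.drop_of_length_le (by omega)]
      simp [tripT]

-- ===== VERDICT (by name: the statement is the Claim_ definition above) =====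
theorem calculate_total_power_spec : Claim_equal_calculate_total_power := by
  intro heroes _
  unfold Spec_calculate_total_power calculate_total_power calculate_total_power_alt
  rw [altLoop1_eq, PySem.Int.mod_eq_emod_of_pos (by norm_num)]
  have h := foldA_outer heroes heroes.length 0 0 le_rfl (by omega)
  simpa only [Int.zero_emod, zero_add] using h
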